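-- pv_equiv track=rewrite | github.com/broalantaps/AnthropomorphicIntelligence | LearnArena/utils/utils.py | allocate_gpus
-- ===== SOURCE A (Python) =====
-- from typing import Dict, Any, List, Optional
--
-- def allocate_gpus(total_gpus: int, processes: int) -> List[List[int]]:
--     """
--     Allocate GPUs for multiple processes.
--
--     Parameters:
--     total_gpus: int - Total number of GPUs available.
--     processes: int - Number of processes to allocate GPUs for.
--
--     Returns:
--     List[List[int]] - A list where each sublist contains the GPUs assigned to a process.
--     """
--     if total_gpus < processes:
--         raise ValueError("Not enough GPUs available for the number of processes.")
--
--     gpus_per_process = total_gpus // processes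
--     extra_gpus = total_gpus % processes
--
--     allocation = []
--     start = 0
--
--     for i in range(processes):
--         end = start + gpus_per_process + (1 if i < extra_gpus else 0)
--         allocation.append(list(range(start, end)))
--         start = end
--
--     return allocation
-- ===== SOURCE B (Python) =====
-- def allocate_gpus(total_gpus: int, processes: int):
--     """
--     Allocate GPUs for multiple processes: each process i gets the block
--     starting at i*q + min(i, r), computed directly from i (no running start).
--     """
--     if total_gpus < processes:
--         raise ValueError("Not enough GPUs available for the number of processes.")
--     q, r = divmod(total_gpus, processes)
--     return [
--         list(range(i * q + min(i, r), (i + 1) * q + min(i + 1, r)))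
--         for i in range(processes)
--     ]
-- ===== Notes on version B (the rewrite author's own statement) =====
-- stated objective: alternative
-- what changed: Replaces the accumulated running `start`/`end` state with a closed-form per-index block boundary i*q + min(i, r), so each sublist is computed independently of the previous iteration.
import Mathlib
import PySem

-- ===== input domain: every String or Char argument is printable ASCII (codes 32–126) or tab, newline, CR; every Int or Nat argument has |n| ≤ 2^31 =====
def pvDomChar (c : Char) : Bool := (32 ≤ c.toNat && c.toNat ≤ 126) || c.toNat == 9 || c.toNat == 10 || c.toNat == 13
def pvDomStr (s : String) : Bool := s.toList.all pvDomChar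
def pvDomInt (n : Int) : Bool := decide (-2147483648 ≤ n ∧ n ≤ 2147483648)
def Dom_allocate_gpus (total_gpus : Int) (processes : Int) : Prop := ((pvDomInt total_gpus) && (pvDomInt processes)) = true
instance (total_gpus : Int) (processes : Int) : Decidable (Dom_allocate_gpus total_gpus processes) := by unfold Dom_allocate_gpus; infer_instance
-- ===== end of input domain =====

-- B replaces A's running start/end accumulator with closed-form block boundaries i*q + min(i,r) computed per index (alternative decomposition, same cost).


-- ===== PORT A =====
-- guards (total_gpus < processes → ValueError; processes = 0 → ZeroDivisionError) return []
-- on inputs excluded by Pre_; otherwise a literal fold carrying (allocation, start).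
def allocate_gpus (total_gpus : Int) (processes : Int) : List (List Int) :=
  if total_gpus < processes then []
  else if processes = 0 then []
  else
    let gpus_per_process := PySem.Int.floordiv total_gpus processes
    let extra_gpus := PySem.Int.mod total_gpus processes
    ((PySem.List.pyRange 0 processes 1).foldl
      (fun (st : List (List Int) × Int) (i : Int) =>
        let endv := st.2 + gpus_per_process + (if i < extra_gpus then 1 else 0)
        (st.1 ++ [PySem.List.pyRange st.2 endv 1], endv))
      ([], 0)).1

-- ===== PORT B =====
def allocate_gpus_alt (total_gpus : Int) (processes : Int) : List (List Int) :=
  if total_gpus < processes then []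
  else if processes = 0 then []
  else
    let q := PySem.Int.floordiv total_gpus processes
    let r := PySem.Int.mod total_gpus processes
    (PySem.List.pyRange 0 processes 1).map
      (fun i => PySem.List.pyRange (i * q + min i r) ((i + 1) * q + min (i + 1) r) 1)

-- ===== PRECONDITION & SPEC =====
-- Pre_ excludes exactly the inputs where Python A raises: ValueError when
-- total_gpus < processes, ZeroDivisionError when processes == 0.
def Pre_allocate_gpus (total_gpus : Int) (processes : Int) : Prop :=
  processes ≤ total_gpus ∧ processes ≠ 0
instance (total_gpus : Int) (processes : Int) : Decidable (Pre_allocate_gpus total_gpus processes) := by unfold Pre_allocate_gpus; infer_instance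
def pvWitness_allocate_gpus : Int × Int := (7, 3)

def Spec_allocate_gpus (total_gpus : Int) (processes : Int) (out : List (List Int)) : Prop := out = allocate_gpus_alt total_gpus processes
instance (total_gpus : Int) (processes : Int) (out : List (List Int)) : Decidable (Spec_allocate_gpus total_gpus processes out) := by unfold Spec_allocate_gpus; infer_instance

-- ===== CLAIM (what is proved, stated in full; the proofs are below) =====
def Claim_equal_allocate_gpus : Prop := ∀ (total_gpus : Int) (processes : Int), Dom_allocate_gpus total_gpus processes → Pre_allocate_gpus total_gpus processes → Spec_allocate_gpus total_gpus processes (allocate_gpus total_gpus processes)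

-- ===== LEMMAS AND PROOFS =====

-- Invariant of A's fold: after processing range(0, n), the carried start is
-- n*q + min n r and the allocation is B's closed-form map over range(0, n).
theorem allocate_fold_inv (q r : Int) (hr : 0 ≤ r) (n : Int) (hn : 0 ≤ n) :
    ((PySem.List.pyRange 0 n 1).foldl
      (fun (st : List (List Int) × Int) (i : Int) =>
        let endv := st.2 + q + (if i < r then 1 else 0)
        (st.1 ++ [PySem.List.pyRange st.2 endv 1], endv))
      ([], 0))
    = ((PySem.List.pyRange 0 n 1).map
        (fun i => PySem.List.pyRange (i * q + min i r) ((i + 1) * q + min (i + 1) r) 1),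
       n * q + min n r) := by
  induction n, hn using Int.le_induction with
  | base => simp [PySem.List.pyRange_one_eq_nil (le_refl 0)]; omega
  | succ n hn ih =>
    rw [PySem.List.pyRange_one_succ_right hn, List.foldl_append, List.map_append, ih]
    simp only [List.foldl_cons, List.foldl_nil, List.map_cons, List.map_nil]
    have hE : n * q + min n r + q + (if n < r then 1 else 0) = (n + 1) * q + min (n + 1) r := by
      have hm : min (n + 1) r = min n r + (if n < r then 1 else 0) := by
        by_cases h : n < r <;> simp [h] <;> omega
      rw [hm]; ring
    rw [hE]

theorem allocate_gpus_spec : Claim_equal_allocate_gpus := by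
  intro t p _ hpre
  obtain ⟨hle, hne⟩ := hpre
  show allocate_gpus t p = allocate_gpus_alt t p
  unfold allocate_gpus allocate_gpus_alt
  rw [if_neg (by omega), if_neg hne, if_neg (by omega), if_neg hne]
  dsimp only
  rcases lt_or_gt_of_ne hne with hneg | hpos
  · rw [PySem.List.pyRange_one_eq_nil (by omega)]; rfl
  · rw [allocate_fold_inv _ _ (PySem.Int.mod_nonneg t hpos) p (le_of_lt hpos)]
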